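-- pv_equiv track=rewrite | github.com/palharesf/fcc_daily_challenges | python/2025/10/20251031.py | spookify
-- ===== SOURCE A (Python) =====
-- def spookify(boo):
--     boo = boo.replace("_", "~").replace("-", "~")
--     char_index = 1
--     for i, char in enumerate(boo):
--         if char.isalpha():
--             char_index += 1
--             if char_index % 2 == 0:
--                 boo = boo[:i] + char.upper() + boo[i + 1 :]
--             else:
--                 boo = boo[:i] + char.lower() + boo[i + 1 :]
--     return boo
-- ===== SOURCE B (Python) =====
-- def spookify(boo):
--     s = boo.replace("_", "~").replace("-", "~")
--     letters = [c.upper() if k % 2 == 0 else c.lower()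
--                for k, c in enumerate(ch for ch in s if ch.isalpha())]
--     it = iter(letters)
--     return "".join(next(it) if c.isalpha() else c for c in s)
-- ===== Notes on version B (the rewrite author's own statement) =====
-- stated objective: faster
-- what changed: B precomputes the alternated-case letters in one pass over the alphabetic characters and then merges them back in a single linear join, instead of A's stateful loop that rebuilds the whole string by slicing at every alphabetic character.
import Mathlib
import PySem

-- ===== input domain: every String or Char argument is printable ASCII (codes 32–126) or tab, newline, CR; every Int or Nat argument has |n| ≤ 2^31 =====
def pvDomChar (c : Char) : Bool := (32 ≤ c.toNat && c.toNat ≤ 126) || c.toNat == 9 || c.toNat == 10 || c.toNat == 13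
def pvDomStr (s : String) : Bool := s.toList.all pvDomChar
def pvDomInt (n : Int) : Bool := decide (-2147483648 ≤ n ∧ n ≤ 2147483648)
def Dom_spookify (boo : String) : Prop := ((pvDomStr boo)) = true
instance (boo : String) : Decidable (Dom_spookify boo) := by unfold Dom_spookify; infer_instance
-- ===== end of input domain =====

-- B replaces A's quadratic slice-and-rebuild toggle loop by one pass collecting the
-- alternated-case letters and one linear merge pass; same return value everywhere.

-- ===== PORT A =====
-- one iteration of A's loop body: state = (char_index, current string), input = enumerate pair
def spookifyStepA (st : Int × List Char) (p : Int × Char) : Int × List Char :=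
  if PySem.Chars.isalpha p.2 then
    let ci := st.1 + 1
    if ci % 2 == 0 then
      (ci, PySem.List.slice st.2 none (some p.1) ++ [PySem.Chars.upperChar p.2]
            ++ PySem.List.slice st.2 (some (p.1 + 1)) none)
    else
      (ci, PySem.List.slice st.2 none (some p.1) ++ [PySem.Chars.lowerChar p.2]
            ++ PySem.List.slice st.2 (some (p.1 + 1)) none)
  else st

def spookify (boo : String) : String :=
  let s := PySem.Chars.replace (PySem.Chars.replace boo.toList ['_'] ['~']) ['-'] ['~']
  String.ofList ((PySem.List.enumerate s 0).foldl spookifyStepA (1, s)).2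

-- ===== PORT B =====
-- merge: emit next(it) for an alphabetic char, the original char otherwise
-- (the [] branch is Python's never-reached iterator exhaustion: letters has one entry per alpha char)
def spookMerge : List Char → List Char → List Char
  | [], _ => []
  | c :: cs, ls =>
    if PySem.Chars.isalpha c then
      match ls with
      | l :: rest => l :: spookMerge cs rest
      | [] => []
    else c :: spookMerge cs ls

def spookify_alt (boo : String) : String :=
  let s := PySem.Chars.replace (PySem.Chars.replace boo.toList ['_'] ['~']) ['-'] ['~']
  let letters := (PySem.List.enumerate (s.filter PySem.Chars.isalpha) 0).map
    (fun p => if p.1 % 2 == 0 then PySem.Chars.upperChar p.2 else PySem.Chars.lowerChar p.2)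
  String.ofList (spookMerge s letters)

-- ===== PRECONDITION & SPEC =====
def Spec_spookify (boo : String) (out : String) : Prop := out = spookify_alt boo
instance (boo : String) (out : String) : Decidable (Spec_spookify boo out) := by unfold Spec_spookify; infer_instance

-- ===== CLAIM (what is proved, stated in full; the proofs are below) =====
def Claim_equal_spookify : Prop := ∀ (boo : String), Dom_spookify boo → Spec_spookify boo (spookify boo)

-- ===== LEMMAS AND PROOFS =====

-- the element-wise recasing that both programs compute
def spookRecase (ci : Int) : List Char → List Char
  | [] => []
  | c :: cs =>
    if PySem.Chars.isalpha c then
      (if (ci + 1) % 2 == 0 then PySem.Chars.upperChar c else PySem.Chars.lowerChar c)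
        :: spookRecase (ci + 1) cs
    else c :: spookRecase ci cs

theorem spookifyA_inv (suf : List Char) : ∀ (pre : List Char) (ci : Int),
    ((PySem.List.enumerate suf (pre.length : Int)).foldl spookifyStepA (ci, pre ++ suf)).2
      = pre ++ spookRecase ci suf := by
  induction suf with
  | nil => intro pre ci; simp [PySem.List.enumerate, spookRecase]
  | cons c cs ih =>
    intro pre ci
    rw [PySem.List.enumerate_cons]
    simp only [List.foldl_cons]
    by_cases h : PySem.Chars.isalpha c = true
    · have hsl1 : PySem.List.slice (pre ++ c :: cs) none (some (pre.length : Int)) = pre := by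
        rw [PySem.List.slice_to_natCast]; simp
      have hsl2 : PySem.List.slice (pre ++ c :: cs) (some ((pre.length : Int) + 1)) none = cs := by
        have : ((pre.length : Int) + 1) = (((pre ++ [c]).length : Nat) : Int) := by
          simp
        rw [this, PySem.List.slice_from_natCast]
        rw [show pre ++ c :: cs = (pre ++ [c]) ++ cs by simp]
        exact List.drop_left
      by_cases hp : (ci + 1) % 2 == 0
      · have : spookifyStepA (ci, pre ++ c :: cs) ((pre.length : Int), c)
            = (ci + 1, (pre ++ [PySem.Chars.upperChar c]) ++ cs) := by
          simp [spookifyStepA, h, hp, hsl1, hsl2]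
        rw [this]
        have := ih (pre ++ [PySem.Chars.upperChar c]) (ci + 1)
        simp only [List.length_append, List.length_cons, List.length_nil] at this ⊢
        rw [show ((pre.length : Int) + 1) = ((pre.length + 1 : Nat) : Int) by omega]
        rw [show (pre.length + 1) = (pre.length + (0+1)) by omega] at this
        rw [this]
        simp [spookRecase, h, hp]
      · have : spookifyStepA (ci, pre ++ c :: cs) ((pre.length : Int), c)
            = (ci + 1, (pre ++ [PySem.Chars.lowerChar c]) ++ cs) := by
          simp [spookifyStepA, h, hp, hsl1, hsl2]
        rw [this]
        have := ih (pre ++ [PySem.Chars.lowerChar c]) (ci + 1)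
        simp only [List.length_append, List.length_cons, List.length_nil] at this ⊢
        rw [show ((pre.length : Int) + 1) = ((pre.length + 1 : Nat) : Int) by omega]
        rw [show (pre.length + 1) = (pre.length + (0+1)) by omega] at this
        rw [this]
        simp [spookRecase, h, hp]
    · have : spookifyStepA (ci, pre ++ c :: cs) ((pre.length : Int), c) = (ci, (pre ++ [c]) ++ cs) := by
        simp [spookifyStepA, h]
      rw [this]
      have := ih (pre ++ [c]) ci
      simp only [List.length_append, List.length_cons, List.length_nil] at this ⊢
      rw [show ((pre.length : Int) + 1) = ((pre.length + 1 : Nat) : Int) by omega]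
      rw [show (pre.length + 1) = (pre.length + (0+1)) by omega] at this
      rw [this]
      simp [spookRecase, h]

theorem spookMerge_letters (s : List Char) : ∀ (k : Int),
    spookMerge s ((PySem.List.enumerate (s.filter PySem.Chars.isalpha) k).map
        (fun p => if p.1 % 2 == 0 then PySem.Chars.upperChar p.2 else PySem.Chars.lowerChar p.2))
      = spookRecase (k + 1) s := by
  induction s with
  | nil => intro k; simp [spookMerge, spookRecase]
  | cons c cs ih =>
    intro k
    by_cases h : PySem.Chars.isalpha c = true
    · simp only [List.filter_cons, h, if_pos, PySem.List.enumerate_cons, List.map_cons]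
      rw [spookMerge]
      simp only [h, if_pos]
      rw [ih (k + 1)]
      have hp : ((k + 2) % 2 == 0) = (k % 2 == 0) := by
        have : (k + 2) % 2 = k % 2 := by omega
        rw [this]
      rw [spookRecase]
      simp only [h, if_pos]
      rw [show k + 1 + 1 = k + 2 by ring, hp]
    · simp only [List.filter_cons, h]
      rw [spookMerge.eq_def]
      simp only [h, Bool.false_eq_true, if_false]
      rw [ih k, spookRecase]
      simp [h]

-- ===== VERDICT (by name: the statement is the Claim_ definition above) =====
theorem spookify_spec : Claim_equal_spookify := by
  intro boo _
  unfold Spec_spookify spookify spookify_alt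
  have h1 := spookifyA_inv
      (PySem.Chars.replace (PySem.Chars.replace boo.toList ['_'] ['~']) ['-'] ['~']) [] 1
  have h2 := spookMerge_letters
      (PySem.Chars.replace (PySem.Chars.replace boo.toList ['_'] ['~']) ['-'] ['~']) 0
  simp only [List.nil_append, List.length_nil, Nat.cast_zero] at h1
  simp only [Int.zero_add] at h2
  dsimp only
  rw [h1, h2]
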